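-- pv_equiv track=rewrite | github.com/Gromit-Kim/coding-test | python/Programmers/알고리즘 고득점 Kit/완전탐색/모의고사.py | solution
-- ===== SOURCE A (Python) =====
-- def solution(answers):
--     one = [1, 2 ,3, 4, 5]
--     two = [2, 1, 2, 3, 2, 4, 2, 5]
--     three = [3, 3, 1, 1, 2, 2, 4, 4, 5, 5]
--
--     cnts = [0, 0, 0]
--     for i, v in enumerate(answers):
--         if v == one[i % len(one)]:
--             cnts[0] += 1
--         if v == two[i % len(two)]:
--             cnts[1] += 1
--         if v == three[i % len(three)]:
--             cnts[2] += 1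
--
--     res = []
--     max_cnt = max(cnts)
--     for i, cnt in enumerate(cnts):
--         if cnt == max_cnt:
--             res.append(i+1)
--     res.sort()
--     return res
-- ===== SOURCE B (Python) =====
-- def solution(answers):
--     patterns = [[1, 2, 3, 4, 5],
--                 [2, 1, 2, 3, 2, 4, 2, 5],
--                 [3, 3, 1, 1, 2, 2, 4, 4, 5, 5]]
--
--     def score(p):
--         s, q = 0, list(p)
--         for a in answers:
--             if not q:
--                 q = list(p)
--             s += a == q[0]
--             q = q[1:]
--         return s
--
--     scores = [score(p) for p in patterns]
--     best = max(scores)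
--     return [i + 1 for i, s in enumerate(scores) if s == best]
-- ===== Notes on version B (the rewrite author's own statement) =====
-- stated objective: alternative
-- what changed: Replaces the single fused loop that tests all three patterns per element (with index-modulo lookups) and the append/sort result loop by three independent scans, each carrying a rotating copy of its pattern, followed by a max and a comprehension over the 3 scores (no sort).
import Mathlib
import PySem

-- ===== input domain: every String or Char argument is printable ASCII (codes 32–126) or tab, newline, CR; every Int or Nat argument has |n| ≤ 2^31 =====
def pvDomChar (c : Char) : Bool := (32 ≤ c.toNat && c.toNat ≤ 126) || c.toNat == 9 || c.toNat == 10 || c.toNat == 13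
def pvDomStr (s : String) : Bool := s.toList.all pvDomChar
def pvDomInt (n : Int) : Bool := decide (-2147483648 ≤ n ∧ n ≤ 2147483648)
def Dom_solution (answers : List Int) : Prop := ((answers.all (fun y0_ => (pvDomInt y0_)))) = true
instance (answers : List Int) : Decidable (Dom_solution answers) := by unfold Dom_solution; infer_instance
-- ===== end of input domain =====

-- B replaces A's fused three-tests-per-element loop (modulo indexing) and append/sort result loop
-- by one rotating-pattern scan per guesser, a max, and a comprehension (no sort); same result.

-- the three fixed guess patterns (shared literal constants)
def pvOne : List Int := [1, 2, 3, 4, 5]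
def pvTwo : List Int := [2, 1, 2, 3, 2, 4, 2, 5]
def pvThree : List Int := [3, 3, 1, 1, 2, 2, 4, 4, 5, 5]

-- ===== PORT A =====
-- the fused loop `for i, v in enumerate(answers)` with three modulo-indexed tests;
-- `one[i % len(one)]` is ported as `getD (i % length) 0`: exact, since the index is always
-- in range (the patterns are fixed nonempty literals, so Python never raises here).
def solutionLoop : Nat → Int × Int × Int → List Int → Int × Int × Int
  | _, c, [] => c
  | i, (c0, c1, c2), v :: rest =>
      solutionLoop (i + 1)
        ((if v = pvOne.getD (i % pvOne.length) 0 then c0 + 1 else c0),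
         (if v = pvTwo.getD (i % pvTwo.length) 0 then c1 + 1 else c1),
         (if v = pvThree.getD (i % pvThree.length) 0 then c2 + 1 else c2)) rest

def solution (answers : List Int) : List Int :=
  let c := solutionLoop 0 (0, 0, 0) answers
  let cnts : List Int := [c.1, c.2.1, c.2.2]
  let max_cnt : Int := (PySem.List.max? cnts (fun x => x)).getD 0  -- cnts nonempty: max never raises
  let res := (PySem.List.enumerate cnts 0).foldl
      (fun r p => if p.2 = max_cnt then r ++ [p.1 + 1] else r) []
  PySem.List.sorted res (fun x => x) false

-- ===== PORT B =====
-- one pass per pattern, carrying a rotating copy `q` of the pattern;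
-- `q[0]` is ported as `headD 0`: exact, since after the reset `q` is the nonempty pattern.
def scoreGo (p : List Int) : List Int → List Int → Int → Int
  | _, [], s => s
  | q, a :: rest, s =>
      let q' := if q.isEmpty then p else q
      scoreGo p (q'.drop 1) rest (s + if a = q'.headD 0 then 1 else 0)

def solution_alt (answers : List Int) : List Int :=
  let scores := [pvOne, pvTwo, pvThree].map (fun p => scoreGo p p answers 0)
  let best : Int := (PySem.List.max? scores (fun x => x)).getD 0
  (PySem.List.enumerate scores 0).filterMap
      (fun p => if p.2 = best then some (p.1 + 1) else none)

-- ===== PRECONDITION & SPEC =====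
def Spec_solution (answers : List Int) (out : List Int) : Prop := out = solution_alt answers
instance (answers : List Int) (out : List Int) : Decidable (Spec_solution answers out) := by unfold Spec_solution; infer_instance

-- ===== CLAIM (what is proved, stated in full; the proofs are below) =====
def Claim_equal_solution : Prop := ∀ (answers : List Int), Dom_solution answers → Spec_solution answers (solution answers)

-- ===== LEMMAS AND PROOFS =====

-- number of matches of `answers` against pattern `p` read cyclically starting at offset j
def cntFrom (p : List Int) : Nat → List Int → Int
  | _, [] => 0
  | j, a :: rest => (if a = p.getD j 0 then 1 else 0) + cntFrom p ((j + 1) % p.length) rest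

-- B's rotating scan counts cyclic matches: invariant q = p.drop j
lemma scoreGo_eq (p : List Int) (hp : p ≠ []) :
    ∀ (answers : List Int) (j : Nat) (s : Int), j ≤ p.length →
      scoreGo p (p.drop j) answers s = s + cntFrom p (j % p.length) answers := by
  intro answers
  induction answers with
  | nil => intro j s _; simp [scoreGo, cntFrom]
  | cons a rest ih =>
    intro j s hj
    have hlen : 0 < p.length := List.length_pos_iff.mpr hp
    rcases eq_or_lt_of_le hj with hj' | hj'
    · -- rotating copy exhausted: reset to p
      subst hj'
      rw [List.drop_length, scoreGo]
      simp only [List.isEmpty_nil, if_true]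
      have := ih 1 (s + if a = p.headD 0 then 1 else 0) hlen
      rw [this, cntFrom, Nat.mod_self]
      have hh : p.headD 0 = p.getD 0 0 := by
        cases p with
        | nil => simp at hp
        | cons x xs => rfl
      rw [hh]
      have h01 : (0 + 1) % p.length = 1 % p.length := rfl
      rw [h01]
      ring
    · -- j < p.length : rotating copy nonempty
      have hne : ¬ (p.drop j).isEmpty := by
        simp [List.isEmpty_iff, List.drop_eq_nil_iff]; omega
      rw [scoreGo]
      simp only [hne, if_neg, Bool.false_eq_true, not_false_iff]
      rw [List.drop_drop]
      have hhead : (p.drop j).headD 0 = p.getD j 0 := by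
        rw [List.headD_eq_head?, List.head?_drop, List.getD_eq_getElem?_getD]
      rw [hhead]
      have := ih (j + 1) (s + if a = p.getD j 0 then 1 else 0) (by omega)
      rw [this, cntFrom]
      have hjm : j % p.length = j := Nat.mod_eq_of_lt hj'
      rw [hjm]
      ring

-- A's fused loop computes the same three cyclic counts
lemma solutionLoop_eq :
    ∀ (answers : List Int) (i : Nat) (c0 c1 c2 : Int),
      solutionLoop i (c0, c1, c2) answers =
        (c0 + cntFrom pvOne (i % 5) answers,
         c1 + cntFrom pvTwo (i % 8) answers,
         c2 + cntFrom pvThree (i % 10) answers) := by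
  intro answers
  induction answers with
  | nil => intro i c0 c1 c2; simp [solutionLoop, cntFrom]
  | cons a rest ih =>
    intro i c0 c1 c2
    rw [solutionLoop, ih, cntFrom, cntFrom, cntFrom]
    have l1 : pvOne.length = 5 := rfl
    have l2 : pvTwo.length = 8 := rfl
    have l3 : pvThree.length = 10 := rfl
    rw [l1, l2, l3]
    have h5 : (i % 5 + 1) % 5 = (i + 1) % 5 := by omega
    have h8 : (i % 8 + 1) % 8 = (i + 1) % 8 := by omega
    have h10 : (i % 10 + 1) % 10 = (i + 1) % 10 := by omega
    rw [h5, h8, h10]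
    refine Prod.ext ?_ (Prod.ext ?_ ?_) <;> simp only [] <;> split_ifs <;> ring

-- result assembly: A's foldl-append + sort equals B's filterMap, given the max is attained
lemma final_eq (s1 s2 s3 m : Int) (hm : s1 = m ∨ s2 = m ∨ s3 = m) :
    PySem.List.sorted
      ((PySem.List.enumerate [s1, s2, s3] 0).foldl
        (fun r p => if p.2 = m then r ++ [p.1 + 1] else r) [])
      (fun x => x) false
    = (PySem.List.enumerate [s1, s2, s3] 0).filterMap
        (fun p => if p.2 = m then some (p.1 + 1) else none) := by
  simp only [PySem.List.enumerate_cons, PySem.List.enumerate_nil, List.foldl, List.filterMap]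
  split_ifs <;> simp_all <;> decide

-- ===== VERDICT (by name: the statement is the Claim_ definition above) =====
theorem solution_spec : Claim_equal_solution := by
  intro answers _
  unfold Spec_solution solution solution_alt
  have e1 : scoreGo pvOne pvOne answers 0 = cntFrom pvOne 0 answers := by
    have := scoreGo_eq pvOne (by decide) answers 0 0 (by omega)
    simpa using this
  have e2 : scoreGo pvTwo pvTwo answers 0 = cntFrom pvTwo 0 answers := by
    have := scoreGo_eq pvTwo (by decide) answers 0 0 (by omega)
    simpa using this
  have e3 : scoreGo pvThree pvThree answers 0 = cntFrom pvThree 0 answers := by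
    have := scoreGo_eq pvThree (by decide) answers 0 0 (by omega)
    simpa using this
  have hc : solutionLoop 0 (0, 0, 0) answers =
      (cntFrom pvOne 0 answers, cntFrom pvTwo 0 answers, cntFrom pvThree 0 answers) := by
    rw [solutionLoop_eq]; norm_num
  rw [hc]
  simp only [List.map_cons, List.map_nil, e1, e2, e3]
  set s1 := cntFrom pvOne 0 answers
  set s2 := cntFrom pvTwo 0 answers
  set s3 := cntFrom pvThree 0 answers
  have hmax : (PySem.List.max? [s1, s2, s3] (fun x => x)).getD 0 = max (max s1 s2) s3 := by
    rw [PySem.List.max?_id_cons]; rfl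
  rw [hmax]
  apply final_eq
  rcases max_cases (max s1 s2) s3 with ⟨h, _⟩ | ⟨h, _⟩
  · rcases max_cases s1 s2 with ⟨h2, _⟩ | ⟨h2, _⟩
    · left; omega
    · right; left; omega
  · right; right; omega
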